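-- pv_equiv track=rewrite | github.com/vivek09thakur/GFG_POTD | 2024/Jan/day19.py | kTop
-- ===== SOURCE A (Python) =====
-- def kTop(a, N, K):
--     #code here.
--     from collections import defaultdict
--     ans=[]
--     cnt=defaultdict(int)
--     lst=[]
--     for i,v in enumerate(a):
--         cnt[v]+=1
--         if cnt[v]==1:
--             lst.append(v)
--         lst.sort(key=lambda x:(-cnt[x],x))
--         ans.append(lst[:min(K,i+1)])
--     return ans
-- ===== SOURCE B (Python) =====
-- def _bisect_left(pairs, key):
--     # hand-written bisect_left (A imports no bisect): first index with pairs[i] >= key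
--     lo, hi = 0, len(pairs)
--     while lo < hi:
--         mid = (lo + hi) // 2
--         if pairs[mid] < key:
--             lo = mid + 1
--         else:
--             hi = mid
--     return lo
--
-- def kTop(a, N, K):
--     # Incremental: keep a list of (-count, value) pairs in sorted order; each step
--     # only the changed pair is moved (binary-searched delete + insert), no re-sort.
--     cnt = {}
--     pairs = []  # sorted ascending by (-count, value)
--     ans = []
--     for v in a:
--         c = cnt.get(v, 0)
--         if c:
--             del pairs[_bisect_left(pairs, (-c, v))]
--         cnt[v] = c + 1
--         key = (-(c + 1), v)
--         pairs.insert(_bisect_left(pairs, key), key)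
--         ans.append([p[1] for p in pairs[:K]])
--     return ans
-- ===== Notes on version B (the rewrite author's own statement) =====
-- stated objective: faster
-- what changed: Instead of re-sorting the whole distinct-value list after every element (A), B maintains the list of (-count, value) pairs in sorted order and per step removes and re-inserts only the one pair whose count changed, locating both positions with a hand-written binary search.
import Mathlib
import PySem

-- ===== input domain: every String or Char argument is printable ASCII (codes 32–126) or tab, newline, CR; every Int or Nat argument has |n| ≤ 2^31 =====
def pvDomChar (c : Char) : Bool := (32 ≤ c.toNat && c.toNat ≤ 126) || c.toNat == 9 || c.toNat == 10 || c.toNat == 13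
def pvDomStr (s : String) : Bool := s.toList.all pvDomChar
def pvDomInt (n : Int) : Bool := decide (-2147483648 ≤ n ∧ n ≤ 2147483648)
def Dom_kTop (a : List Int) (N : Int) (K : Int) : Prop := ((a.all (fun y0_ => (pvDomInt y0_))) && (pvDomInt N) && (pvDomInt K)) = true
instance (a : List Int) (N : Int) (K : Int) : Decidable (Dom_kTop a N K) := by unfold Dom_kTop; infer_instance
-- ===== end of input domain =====

-- B replaces A's per-step full re-sort of the distinct-value list by an incremental update of a
-- sorted (-count, value) pair list (binary-searched delete + insert of the one changed pair).

-- ===== PORT A =====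
-- ===== PORT A =====
-- Python's tuple comparison (-cnt[x], x) < (-cnt[y], y) is lexicographic (shared semantics helper)
def pvLexLt (p q : Int × Int) : Bool := decide (p.1 < q.1 ∨ (p.1 = q.1 ∧ p.2 < q.2))

def pvStepA (K : Int) (st : PySem.Dict Int Int × List Int × List (List Int)) (iv : Int × Int) :
    PySem.Dict Int Int × List Int × List (List Int) :=
  match st, iv with
  | (cnt, lst, ans), (i, v) =>
    let cnt1 := cnt.insert v (cnt.getD v 0 + 1)            -- cnt[v] += 1  (defaultdict read-then-store)
    let lst1 := if cnt1.getD v 0 == 1 then lst ++ [v] else lst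
    let lst2 := PySem.List.sorted2 lst1 (fun x => -(cnt1.getD x 0)) (fun x => x)  -- lst.sort(key=lambda x:(-cnt[x],x))
    (cnt1, lst2, ans ++ [PySem.List.slice lst2 none (some (min K (i + 1)))])

def kTop (a : List Int) (N : Int) (K : Int) : List (List Int) :=
  ((PySem.List.enumerate a 0).foldl (pvStepA K) (PySem.Dict.empty, [], [])).2.2

-- ===== PORT B =====
-- ===== PORT B =====
-- hand-written bisect_left of Source B (pairs[mid] is always in range when called with hi ≤ pairs.length,
-- as Source B's len(pairs) start guarantees; the (0,0) default is never read)
def pvBisGo (pairs : List (Int × Int)) (key : Int × Int) (lo hi : Nat) : Nat :=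
  if lo < hi then
    let mid := (lo + hi) / 2
    if pvLexLt (pairs.getD mid (0, 0)) key then pvBisGo pairs key (mid + 1) hi
    else pvBisGo pairs key lo mid
  else lo
termination_by hi - lo
decreasing_by all_goals omega

def pvBis (pairs : List (Int × Int)) (key : Int × Int) : Nat := pvBisGo pairs key 0 pairs.length

def pvStepB (K : Int) (st : PySem.Dict Int Int × List (Int × Int) × List (List Int)) (v : Int) :
    PySem.Dict Int Int × List (Int × Int) × List (List Int) :=
  match st with
  | (cnt, pairs, ans) =>
    let c := cnt.getD v 0                                          -- c = cnt.get(v, 0)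
    let pairs1 := if c ≠ 0 then pairs.eraseIdx (pvBis pairs (-c, v)) else pairs
      -- del pairs[_bisect_left(pairs,(-c,v))]: the index is always < len(pairs) (the pair is present)
    let cnt1 := cnt.insert v (c + 1)
    let pairs2 := PySem.List.insert pairs1 ((pvBis pairs1 (-(c + 1), v) : Nat) : Int) (-(c + 1), v)
    (cnt1, pairs2, ans ++ [(PySem.List.slice pairs2 none (some K)).map Prod.snd])

def kTop_alt (a : List Int) (N : Int) (K : Int) : List (List Int) :=
  (a.foldl (pvStepB K) (PySem.Dict.empty, [], [])).2.2

-- ===== PRECONDITION & SPEC =====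
def Spec_kTop (a : List Int) (N : Int) (K : Int) (out : List (List Int)) : Prop := out = kTop_alt a N K
instance (a : List Int) (N : Int) (K : Int) (out : List (List Int)) : Decidable (Spec_kTop a N K out) := by unfold Spec_kTop; infer_instance

-- ===== CLAIM (what is proved, stated in full; the proofs are below) =====
def Claim_equal_kTop : Prop := ∀ (a : List Int) (N : Int) (K : Int), Dom_kTop a N K → Spec_kTop a N K (kTop a N K)

-- ===== LEMMAS AND PROOFS =====
lemma pvLexLt_irrefl (p : Int × Int) : pvLexLt p p = false := by
  rcases p with ⟨a, b⟩; simp [pvLexLt]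

lemma pvLexLt_total (p q : Int × Int) (h : pvLexLt p q = false) (hne : p ≠ q) :
    pvLexLt q p = true := by
  rcases p with ⟨a, b⟩; rcases q with ⟨c, d⟩
  have hne' : a ≠ c ∨ b ≠ d := by
    rcases eq_or_ne a c with rfl | h1
    · rcases eq_or_ne b d with rfl | h2
      · exact absurd rfl hne
      · exact Or.inr h2
    · exact Or.inl h1
  simp only [pvLexLt, decide_eq_false_iff_not, decide_eq_true_eq] at h ⊢
  omega

lemma pvLexLt_trans (p q r : Int × Int) (h1 : pvLexLt p q = true) (h2 : pvLexLt q r = true) :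
    pvLexLt p r = true := by
  simp only [pvLexLt, decide_eq_true_eq] at *
  omega

lemma pvBisGo_spec (pairs : List (Int × Int)) (key : Int × Int)
    (hmono : ∀ i j (hi : i < pairs.length) (hj : j < pairs.length), i ≤ j →
      pvLexLt pairs[j] key = true → pvLexLt pairs[i] key = true) :
    ∀ (lo hi : Nat), lo ≤ hi → hi ≤ pairs.length →
    (∀ i (h : i < pairs.length), i < lo → pvLexLt pairs[i] key = true) →
    (∀ i (h : i < pairs.length), hi ≤ i → pvLexLt pairs[i] key = false) →
    lo ≤ pvBisGo pairs key lo hi ∧ pvBisGo pairs key lo hi ≤ hi ∧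
    (∀ i (h : i < pairs.length), i < pvBisGo pairs key lo hi → pvLexLt pairs[i] key = true) ∧
    (∀ i (h : i < pairs.length), pvBisGo pairs key lo hi ≤ i → pvLexLt pairs[i] key = false) := by
  intro lo hi
  induction lo, hi using pvBisGo.induct pairs key with
  | case1 lo hi hlt mid htest ih =>
    intro hle hlen hbelow habove
    rw [pvBisGo, if_pos hlt]
    rw [if_pos htest]
    have hmid : mid < pairs.length := by omega
    have hmidval : pairs.getD mid (0,0) = pairs[mid] :=
      List.getD_eq_getElem pairs (0,0) hmid
    rw [hmidval] at htest
    have hbelow' : ∀ i (h : i < pairs.length), i < mid + 1 → pvLexLt pairs[i] key = true := by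
      intro i h hi
      rcases Nat.lt_or_ge i lo with h'|h'
      · exact hbelow i h h'
      · exact hmono i mid h hmid (by omega) htest
    have h1 := ih (by omega) hlen hbelow' habove
    rw [show (lo + hi) / 2 = mid from rfl]
    exact ⟨by omega, by omega, h1.2.2.1, h1.2.2.2⟩
  | case2 lo hi hlt mid htest ih =>
    intro hle hlen hbelow habove
    rw [pvBisGo, if_pos hlt]
    rw [if_neg htest]
    have hmid : mid < pairs.length := by omega
    have hmidval : pairs.getD mid (0,0) = pairs[mid] :=
      List.getD_eq_getElem pairs (0,0) hmid
    rw [hmidval] at htest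
    simp only [Bool.not_eq_true] at htest
    have habove' : ∀ i (h : i < pairs.length), mid ≤ i → pvLexLt pairs[i] key = false := by
      intro i h hi'
      by_contra hc
      simp only [Bool.not_eq_false] at hc
      have := hmono mid i hmid h hi' hc
      rw [htest] at this
      exact absurd this (by simp)
    have h1 := ih (by omega) (by omega) hbelow habove'
    rw [show (lo + hi) / 2 = mid from rfl]
    exact ⟨h1.1, by omega, h1.2.2.1, h1.2.2.2⟩
  | case3 lo hi hlt =>
    intro hle hlen hbelow habove
    rw [pvBisGo, if_neg hlt]
    exact ⟨le_refl _, hle, fun i h hi => hbelow i h hi, fun i h hi => habove i h (by omega)⟩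

lemma pvBis_spec (pairs : List (Int × Int)) (key : Int × Int)
    (hp : pairs.Pairwise (fun p q => pvLexLt p q = true)) :
    pvBis pairs key ≤ pairs.length ∧
    (∀ i (h : i < pairs.length), i < pvBis pairs key → pvLexLt pairs[i] key = true) ∧
    (∀ i (h : i < pairs.length), pvBis pairs key ≤ i → pvLexLt pairs[i] key = false) := by
  have hmono : ∀ i j (hi : i < pairs.length) (hj : j < pairs.length), i ≤ j →
      pvLexLt pairs[j] key = true → pvLexLt pairs[i] key = true := by
    intro i j hi hj hij hj2
    rcases Nat.lt_or_ge i j with h'|h'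
    · exact pvLexLt_trans _ _ _ (List.pairwise_iff_getElem.mp hp i j hi hj h') hj2
    · have : i = j := by omega
      subst this; exact hj2
  have h := pvBisGo_spec pairs key hmono 0 pairs.length (Nat.zero_le _) (le_refl _)
    (fun i h hi => absurd hi (by omega)) (fun i h hi => absurd h (by omega))
  exact ⟨h.2.1, h.2.2.1, h.2.2.2⟩

lemma pvEraseIdx_append (L R : List (Int × Int)) (k : Int × Int) :
    List.eraseIdx (L ++ k :: R) L.length = L ++ R := by
  induction L with
  | nil => simp
  | cons x L ih => simp [ih]

lemma pvBis_of_mem (L R : List (Int × Int)) (key : Int × Int)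
    (hp : (L ++ key :: R).Pairwise (fun p q => pvLexLt p q = true)) :
    pvBis (L ++ key :: R) key = L.length := by
  have hs := pvBis_spec (L ++ key :: R) key hp
  have hlen : L.length < (L ++ key :: R).length := by simp
  have hkey : (L ++ key :: R)[L.length] = key := by
    rw [List.getElem_append_right (le_refl _)]
    simp
  have hnotlt : pvLexLt (L ++ key :: R)[L.length] key = false := by
    rw [hkey]; exact pvLexLt_irrefl key
  have hle : pvBis (L ++ key :: R) key ≤ L.length := by
    by_contra hc
    have := hs.2.1 L.length hlen (by omega)
    rw [hnotlt] at this; exact absurd this (by simp)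
  rcases Nat.lt_or_ge (pvBis (L ++ key :: R) key) L.length with h | h
  · exfalso
    have hr : pvBis (L ++ key :: R) key < (L ++ key :: R).length := by omega
    have hfalse := hs.2.2 _ hr (le_refl _)
    have htrue : pvLexLt (L ++ key :: R)[pvBis (L ++ key :: R) key] key = true := by
      have := List.pairwise_iff_getElem.mp hp (pvBis (L ++ key :: R) key) L.length hr hlen h
      rwa [hkey] at this
    rw [hfalse] at htrue; exact absurd htrue (by simp)
  · omega

-- inserting a fresh key at its bisect position keeps the list strictly sorted
lemma pvInsert_sorted (pairs : List (Int × Int)) (key : Int × Int)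
    (hp : pairs.Pairwise (fun p q => pvLexLt p q = true))
    (hfresh : ∀ p ∈ pairs, p ≠ key) :
    PySem.List.insert pairs ((pvBis pairs key : Nat) : Int) key
      = pairs.take (pvBis pairs key) ++ key :: pairs.drop (pvBis pairs key) ∧
    (pairs.take (pvBis pairs key) ++ key :: pairs.drop (pvBis pairs key)).Pairwise
      (fun p q => pvLexLt p q = true) := by
  have hs := pvBis_spec pairs key hp
  set j := pvBis pairs key with hj
  constructor
  · exact PySem.List.insert_natCast pairs j key hs.1
  · have htake : ∀ x ∈ pairs.take j, pvLexLt x key = true := by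
      intro x hx
      rcases List.mem_take_iff_getElem.mp hx with ⟨i, hm, hi⟩
      have : i < pairs.length := by omega
      rw [← hi]; exact hs.2.1 i this (by omega)
    have hdrop : ∀ y ∈ pairs.drop j, pvLexLt key y = true := by
      intro y hy
      rcases List.mem_drop_iff_getElem.mp hy with ⟨i, hm, hi⟩
      rw [← hi]
      refine pvLexLt_total _ _ (hs.2.2 (j + i) (by omega) (by omega)) ?_
      exact hfresh _ (List.getElem_mem _)
    rw [List.pairwise_append]
    refine ⟨hp.sublist (List.take_sublist _ _), ?_, ?_⟩
    · rw [List.pairwise_cons]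
      exact ⟨hdrop, hp.sublist (List.drop_sublist _ _)⟩
    · intro x hx y hy
      rcases List.mem_cons.mp hy with rfl | hy'
      · exact htake x hx
      · -- x before y inside pairs itself
        have hp' : List.Pairwise (fun p q => pvLexLt p q = true)
            (pairs.take j ++ pairs.drop j) := by
          rw [List.take_append_drop]; exact hp
        exact (List.pairwise_append.mp hp').2.2 x hx y hy'

lemma pvSorted2_eq_sorted (lst : List Int) (k1 : Int → Int) :
    PySem.List.sorted2 lst k1 (fun x => x)
      = PySem.List.sorted lst (fun x => toLex (k1 x, x)) := by
  have hfun : (fun a b : Int => decide (k1 a < k1 b) || (!decide (k1 b < k1 a) && decide (a < b)))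
      = fun a b : Int => decide (toLex (k1 a, a) < toLex (k1 b, b)) := by
    funext a b
    by_cases h1 : k1 a < k1 b <;> by_cases h2 : k1 b < k1 a <;> by_cases h3 : a < b <;>
      simp [Prod.Lex.lt_iff, h1, h2, h3] <;> omega
  have h1 : PySem.List.sorted2 lst k1 (fun x => x)
      = lst.foldl (fun acc x => PySem.List.insertBy
          (fun a b => decide (k1 a < k1 b) || (!decide (k1 b < k1 a) && decide (a < b))) x acc) [] := rfl
  have h2 : PySem.List.sorted lst (fun x => toLex (k1 x, x))
      = lst.foldl (fun acc x => PySem.List.insertBy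
          (fun a b => decide (toLex (k1 a, a) < toLex (k1 b, b))) x acc) [] := rfl
  rw [h1, h2, hfun]

lemma pvSorted2_unique (lst ys : List Int) (k1 : Int → Int) (hperm : ys.Perm lst)
    (hpw : ys.Pairwise (fun x y => pvLexLt (k1 x, x) (k1 y, y) = true)) :
    PySem.List.sorted2 lst k1 (fun x => x) = ys := by
  rw [pvSorted2_eq_sorted]
  apply PySem.List.sorted_eq_of_perm_of_pairwise_lt _ _ _ hperm
  refine hpw.imp ?_
  intro x y h
  rw [Prod.Lex.lt_iff]
  simpa [pvLexLt] using h

lemma pvSlice_min (l : List Int) (K : Int) (m : Nat) (hlen : l.length ≤ m + 1) :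
    PySem.List.slice l none (some (min K ((m : Int) + 1))) = PySem.List.slice l none (some K) := by
  rcases le_or_gt K ((m : Int) + 1) with h | h
  · rw [min_eq_left h]
  · have h0 : (0 : Int) ≤ K := by omega
    rw [min_eq_right (le_of_lt h), PySem.List.slice_to _ (by omega), PySem.List.slice_to _ h0]
    rw [List.take_of_length_le (by omega), List.take_of_length_le (by omega)]

lemma pvSlice_map_snd (pairs : List (Int × Int)) (K : Int) :
    PySem.List.slice (pairs.map Prod.snd) none (some K)
      = (PySem.List.slice pairs none (some K)).map Prod.snd := by
  rcases le_or_gt 0 K with h | h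
  · rw [PySem.List.slice_to _ h, PySem.List.slice_to _ h, List.map_take]
  · obtain ⟨k, hk, rfl⟩ : ∃ k : Nat, 0 < k ∧ K = -(k : Int) := ⟨K.natAbs, by omega, by omega⟩
    rw [PySem.List.slice_to_neg_natCast _ _ hk, PySem.List.slice_to_neg_natCast _ _ hk,
      List.map_take, List.length_map]

def pvInv (cnt : PySem.Dict Int Int) (lst : List Int) (pairs : List (Int × Int)) (n : Nat) : Prop :=
  pairs.map Prod.snd = lst ∧
  (∀ p ∈ pairs, p.1 = -(cnt.getD p.2 0)) ∧
  pairs.Pairwise (fun p q => pvLexLt p q = true) ∧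
  (∀ x : Int, x ∈ lst ↔ cnt.getD x 0 ≠ 0) ∧
  lst.length ≤ n ∧
  (∀ x : Int, 0 ≤ cnt.getD x 0)

lemma pvPairwise_snd (pairs : List (Int × Int)) (k1 : Int → Int)
    (hfst : ∀ p ∈ pairs, p.1 = k1 p.2)
    (hpw : pairs.Pairwise (fun p q => pvLexLt p q = true)) :
    (pairs.map Prod.snd).Pairwise (fun x y => pvLexLt (k1 x, x) (k1 y, y) = true) := by
  rw [List.pairwise_map]
  refine List.Pairwise.imp_of_mem ?_ hpw
  intro p q hp hq h
  have h1 := hfst p hp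
  have h2 := hfst q hq
  rcases p with ⟨p1, p2⟩; rcases q with ⟨q1, q2⟩
  simp only at h1 h2 ⊢
  rwa [← h1, ← h2]

-- shared insertion phase of one step of B
lemma pvInsert_step (cnt : PySem.Dict Int Int) (v c : Int) (pairs1 : List (Int × Int))
    (hpw1 : pairs1.Pairwise (fun p q => pvLexLt p q = true))
    (hsnd : ∀ p ∈ pairs1, p.2 ≠ v)
    (hfst1 : ∀ p ∈ pairs1, p.1 = -(cnt.getD p.2 0)) :
    PySem.List.insert pairs1 ((pvBis pairs1 (-(c+1), v) : Nat) : Int) (-(c+1), v)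
      = pairs1.take (pvBis pairs1 (-(c+1), v)) ++ (-(c+1), v) :: pairs1.drop (pvBis pairs1 (-(c+1), v)) ∧
    (pairs1.take (pvBis pairs1 (-(c+1), v)) ++ (-(c+1), v) :: pairs1.drop (pvBis pairs1 (-(c+1), v))).Pairwise
      (fun p q => pvLexLt p q = true) ∧
    (∀ p ∈ pairs1.take (pvBis pairs1 (-(c+1), v)) ++ (-(c+1), v) :: pairs1.drop (pvBis pairs1 (-(c+1), v)),
      p.1 = -((cnt.insert v (c+1)).getD p.2 0)) ∧
    ((pairs1.take (pvBis pairs1 (-(c+1), v)) ++ (-(c+1), v) :: pairs1.drop (pvBis pairs1 (-(c+1), v))).map Prod.snd).Perm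
      (v :: pairs1.map Prod.snd) := by
  have hfresh : ∀ p ∈ pairs1, p ≠ (-(c+1), v) := by
    intro p hp he
    exact hsnd p hp (by rw [he])
  obtain ⟨heq, hpw2⟩ := pvInsert_sorted pairs1 (-(c+1), v) hpw1 hfresh
  refine ⟨heq, hpw2, ?_, ?_⟩
  · intro p hp
    have hmem : p = (-(c+1), v) ∨ p ∈ pairs1 := by
      rcases List.mem_append.mp hp with h | h
      · exact Or.inr (List.mem_of_mem_take h)
      · rcases List.mem_cons.mp h with h | h
        · exact Or.inl h
        · exact Or.inr (List.mem_of_mem_drop h)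
    rcases hmem with rfl | hmem
    · simp
    · rw [hfst1 p hmem, PySem.Dict.getD_insert, if_neg (hsnd p hmem)]
  · have hperm : (pairs1.take (pvBis pairs1 (-(c+1), v)) ++ (-(c+1), v) :: pairs1.drop (pvBis pairs1 (-(c+1), v))).Perm
        ((-(c+1), v) :: pairs1) := by
      have := List.perm_middle (a := (-(c+1), v))
        (l₁ := pairs1.take (pvBis pairs1 (-(c+1), v))) (l₂ := pairs1.drop (pvBis pairs1 (-(c+1), v)))
      rwa [List.take_append_drop] at this
    simpa using hperm.map Prod.snd

lemma pvStep_eq (K : Int) (n : Nat) (cnt : PySem.Dict Int Int) (lst : List Int)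
    (pairs : List (Int × Int)) (ansA ansB : List (List Int)) (v : Int)
    (h : pvInv cnt lst pairs n) :
    ∃ cnt1 lst2 pairs2 e,
      pvStepA K (cnt, lst, ansA) ((n : Int), v) = (cnt1, lst2, ansA ++ [e]) ∧
      pvStepB K (cnt, pairs, ansB) v = (cnt1, pairs2, ansB ++ [e]) ∧
      pvInv cnt1 lst2 pairs2 (n + 1) := by
  obtain ⟨hmap, hfst, hpw, hmem, hlen, hnn⟩ := h
  have hcnn : 0 ≤ cnt.getD v 0 := hnn v
  have hget1 : (cnt.insert v (cnt.getD v 0 + 1)).getD v 0 = cnt.getD v 0 + 1 := by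
    rw [PySem.Dict.getD_insert, if_pos rfl]
  have hgetne : ∀ x : Int, x ≠ v →
      (cnt.insert v (cnt.getD v 0 + 1)).getD x 0 = cnt.getD x 0 := by
    intro x hx; rw [PySem.Dict.getD_insert, if_neg hx]
  by_cases hc0 : cnt.getD v 0 = 0
  · -- v is new: B's removal branch is skipped, A appends v
    have hvlst : v ∉ lst := fun hv => ((hmem v).mp hv) hc0
    have hsnd : ∀ p ∈ pairs, p.2 ≠ v := by
      intro p hp he
      exact hvlst (hmap ▸ List.mem_map.mpr ⟨p, hp, he⟩)
    obtain ⟨heq, hpw2, hfst2, hperm⟩ := pvInsert_step cnt v (cnt.getD v 0) pairs hpw hsnd hfst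
    set j := pvBis pairs (-(cnt.getD v 0 + 1), v) with hj
    set pairs2 := pairs.take j ++ (-(cnt.getD v 0 + 1), v) :: pairs.drop j with hpairs2
    have hperm1 : (pairs2.map Prod.snd).Perm (lst ++ [v]) := by
      refine hperm.trans ?_
      rw [hmap]
      exact (List.perm_append_singleton v lst).symm
    have hlst2 : PySem.List.sorted2 (lst ++ [v])
        (fun x => -((cnt.insert v (cnt.getD v 0 + 1)).getD x 0)) (fun x => x)
        = pairs2.map Prod.snd := by
      refine pvSorted2_unique _ _ _ hperm1 ?_
      exact pvPairwise_snd pairs2 _ (fun p hp => hfst2 p hp) hpw2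
    have hlen2 : (pairs2.map Prod.snd).length ≤ n + 1 := by
      have h2 := hperm1.length_eq
      simp only [List.length_append, List.length_cons, List.length_map, List.length_nil] at h2
      simp only [List.length_map]
      omega
    refine ⟨cnt.insert v (cnt.getD v 0 + 1), pairs2.map Prod.snd, pairs2,
      (PySem.List.slice pairs2 none (some K)).map Prod.snd, ?_, ?_, ?_⟩
    · simp only [pvStepA]
      rw [hget1, if_pos (by rw [hc0]; rfl), hlst2, pvSlice_min _ K n hlen2, pvSlice_map_snd]
    · simp only [pvStepB]
      rw [if_neg (by omega), ← hj, heq]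
    · refine ⟨rfl, hfst2, hpw2, ?_, hlen2, ?_⟩
      · intro x
        constructor
        · intro hx
          rcases List.mem_append.mp (hperm1.subset hx) with hx' | hx'
          · rcases eq_or_ne x v with rfl | hne
            · rw [hget1]; omega
            · rw [hgetne x hne]; exact (hmem x).mp hx'
          · have : x = v := by simpa using hx'
            subst this; rw [hget1]; omega
        · intro hx
          rcases eq_or_ne x v with rfl | hne
          · exact hperm1.symm.subset (List.mem_append.mpr (Or.inr (by simp)))
          · rw [hgetne x hne] at hx
            exact hperm1.symm.subset (List.mem_append.mpr (Or.inl ((hmem x).mpr hx)))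
      · intro x
        rcases eq_or_ne x v with rfl | hne
        · rw [hget1]; omega
        · rw [hgetne x hne]; exact hnn x
  · -- v already present: its old pair (-c, v) sits in pairs and is removed first
    have hvlst : v ∈ lst := (hmem v).mpr hc0
    obtain ⟨p0, hp0mem, hp0snd⟩ := List.mem_map.mp (hmap ▸ hvlst)
    have hp0 : p0 = (-(cnt.getD v 0), v) := by
      have h1 := hfst p0 hp0mem
      rcases p0 with ⟨a, b⟩
      simp only at hp0snd h1
      subst hp0snd
      rw [h1]
    subst hp0
    obtain ⟨L, R, hLR⟩ := List.append_of_mem hp0mem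
    have hbis : pvBis pairs (-(cnt.getD v 0), v) = L.length := by
      rw [hLR]; exact pvBis_of_mem L R _ (hLR ▸ hpw)
    have hpairs1 : pairs.eraseIdx (pvBis pairs (-(cnt.getD v 0), v)) = L ++ R := by
      rw [hbis, hLR]; exact pvEraseIdx_append L R _
    have hsub : (L ++ R).Sublist pairs := by
      rw [hLR]
      exact (List.sublist_cons_self _ R).append_left L
    have hpw1 : (L ++ R).Pairwise (fun p q => pvLexLt p q = true) := hpw.sublist hsub
    have hirr := pvLexLt_irrefl (-(cnt.getD v 0), v)
    have hsnd1 : ∀ p ∈ L ++ R, p.2 ≠ v := by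
      intro p hp he
      have hpairs : p ∈ pairs := hsub.subset hp
      have hpe : p = (-(cnt.getD v 0), v) := by
        have h1 := hfst p hpairs
        rcases p with ⟨a, b⟩
        simp only at he h1
        subst he
        rw [h1]
      subst hpe
      rw [hLR] at hpw
      rcases List.mem_append.mp hp with hL | hR
      · have := (List.pairwise_append.mp hpw).2.2 _ hL _ (List.mem_cons_self)
        rw [hirr] at this; exact absurd this (by simp)
      · have := (List.pairwise_cons.mp (List.pairwise_append.mp hpw).2.1).1 _ hR
        rw [hirr] at this; exact absurd this (by simp)
    have hfst1 : ∀ p ∈ L ++ R, p.1 = -(cnt.getD p.2 0) := fun p hp => hfst p (hsub.subset hp)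
    obtain ⟨heq, hpw2, hfst2, hperm⟩ := pvInsert_step cnt v (cnt.getD v 0) (L ++ R) hpw1 hsnd1 hfst1
    set j := pvBis (L ++ R) (-(cnt.getD v 0 + 1), v) with hj
    set pairs2 := (L ++ R).take j ++ (-(cnt.getD v 0 + 1), v) :: (L ++ R).drop j with hpairs2
    have hlstdecomp : lst = L.map Prod.snd ++ v :: R.map Prod.snd := by
      rw [← hmap, hLR]; simp
    have hperm1 : (pairs2.map Prod.snd).Perm lst := by
      refine hperm.trans ?_
      rw [hlstdecomp, List.map_append]
      exact List.perm_middle.symm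
    have hlst2 : PySem.List.sorted2 lst
        (fun x => -((cnt.insert v (cnt.getD v 0 + 1)).getD x 0)) (fun x => x)
        = pairs2.map Prod.snd := by
      refine pvSorted2_unique _ _ _ hperm1 ?_
      exact pvPairwise_snd pairs2 _ (fun p hp => hfst2 p hp) hpw2
    have hlen2 : (pairs2.map Prod.snd).length ≤ n := by
      rw [hperm1.length_eq]; exact hlen
    refine ⟨cnt.insert v (cnt.getD v 0 + 1), pairs2.map Prod.snd, pairs2,
      (PySem.List.slice pairs2 none (some K)).map Prod.snd, ?_, ?_, ?_⟩
    · simp only [pvStepA]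
      rw [hget1, if_neg (by simp; omega), hlst2, pvSlice_min _ K n (by omega), pvSlice_map_snd]
    · simp only [pvStepB]
      rw [if_pos hc0, hpairs1, ← hj, heq]
    · refine ⟨rfl, hfst2, hpw2, ?_, by omega, ?_⟩
      · intro x
        constructor
        · intro hx
          have hx' := hperm.subset hx
          rcases List.mem_cons.mp hx' with rfl | hx''
          · rw [hget1]; omega
          · rcases eq_or_ne x v with rfl | hne
            · rw [hget1]; omega
            · rw [hgetne x hne]
              refine (hmem x).mp ?_
              rw [hlstdecomp]
              rcases List.mem_map.mp hx'' with ⟨p, hp, rfl⟩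
              rcases List.mem_append.mp hp with hL | hR
              · exact List.mem_append.mpr (Or.inl (List.mem_map.mpr ⟨p, hL, rfl⟩))
              · exact List.mem_append.mpr (Or.inr (List.mem_cons.mpr (Or.inr (List.mem_map.mpr ⟨p, hR, rfl⟩))))
        · intro hx
          rcases eq_or_ne x v with rfl | hne
          · exact hperm.symm.subset (List.mem_cons_self)
          · rw [hgetne x hne] at hx
            have hxl := (hmem x).mpr hx
            rw [hlstdecomp] at hxl
            refine hperm.symm.subset (List.mem_cons.mpr (Or.inr ?_))
            rw [List.map_append]
            rcases List.mem_append.mp hxl with hL | hR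
            · exact List.mem_append.mpr (Or.inl hL)
            · rcases List.mem_cons.mp hR with rfl | hR'
              · exact absurd rfl hne
              · exact List.mem_append.mpr (Or.inr hR')
      · intro x
        rcases eq_or_ne x v with rfl | hne
        · rw [hget1]; omega
        · rw [hgetne x hne]; exact hnn x

lemma pvLoop (K : Int) (a : List Int) : ∀ (n : Nat) (cnt : PySem.Dict Int Int)
    (lst : List Int) (pairs : List (Int × Int)) (ans : List (List Int)),
    pvInv cnt lst pairs n →
    ((PySem.List.enumerate a (n : Int)).foldl (pvStepA K) (cnt, lst, ans)).2.2
      = (a.foldl (pvStepB K) (cnt, pairs, ans)).2.2 := by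
  induction a with
  | nil =>
    intro n cnt lst pairs ans h
    simp [PySem.List.enumerate]
  | cons v t ih =>
    intro n cnt lst pairs ans h
    rw [PySem.List.enumerate_cons, List.foldl_cons, List.foldl_cons]
    obtain ⟨cnt1, lst2, pairs2, e, hA, hB, hInv⟩ := pvStep_eq K n cnt lst pairs ans ans v h
    rw [hA, hB]
    rw [show ((n : Int) + 1) = ((n + 1 : Nat) : Int) by push_cast; ring]
    exact ih (n + 1) cnt1 lst2 pairs2 (ans ++ [e]) hInv

lemma pvInv_init : pvInv PySem.Dict.empty [] [] 0 := by
  refine ⟨rfl, by simp, by simp, ?_, by simp, ?_⟩ <;> intro x <;> simp [PySem.Dict.getD, PySem.Dict.get?, PySem.Dict.empty]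

theorem kTop_eq (a : List Int) (N K : Int) : kTop a N K = kTop_alt a N K := by
  unfold kTop kTop_alt
  rw [show (0 : Int) = ((0 : Nat) : Int) by simp]
  exact pvLoop K a 0 PySem.Dict.empty [] [] [] pvInv_init

-- ===== VERDICT (by name: the statement is the Claim_ definition above) =====
theorem kTop_spec : Claim_equal_kTop := by
  intro a N K _
  unfold Spec_kTop
  exact kTop_eq a N K
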